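-- pv_equiv track=rewrite | github.com/JuyeolRyu/CodingTest | 백수/algorithm/Graph/자동완성.py | solution
-- ===== SOURCE A (Python) =====
-- def make_trie(root,word):
--     cur_node=root
--     for c in word:
--         if c not in cur_node[1]:
--             cur_node[1][c]=[0,dict()]
--
--         cur_node[0]+=1
--         cur_node=cur_node[1][c]
--     cur_node[0]+=1
--
-- def search_target(root,word):
--     ret=0
--     cur_node=root
--
--     for c in word:
--         if cur_node[0]==1:
--             return ret
--         ret+=1
--         cur_node=cur_node[1][c]
--
--     return ret
--
-- def solution(words):
--     answer = 0
--     root=[0,dict()]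
--
--     for word in words:
--         make_trie(root,word)
--     for word in words:
--         answer += search_target(root,word)
--
--     return answer
-- ===== SOURCE B (Python) =====
-- def lcp(a, b):
--     n = 0
--     for x, y in zip(a, b):
--         if x != y:
--             break
--         n += 1
--     return n
--
-- def solution(words):
--     # A single word needs no typing (the trie root already counts just it).
--     if len(words) == 1:
--         return 0
--     total = 0
--     for i, w in enumerate(words):
--         m = 0
--         for u in words[:i] + words[i+1:]:
--             m = max(m, lcp(w, u))
--         total += min(len(w), m + 1)
--     return total
-- ===== Notes on version B (the rewrite author's own statement) =====
-- stated objective: simpler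
-- what changed: Replaces the mutable trie (build per-prefix-node counts, then re-walk each word until its node count is 1) by a direct pairwise rule: each word contributes min(len(w), 1 + max longest-common-prefix with any other word), summed, with a single-word list contributing 0.
import Mathlib
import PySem

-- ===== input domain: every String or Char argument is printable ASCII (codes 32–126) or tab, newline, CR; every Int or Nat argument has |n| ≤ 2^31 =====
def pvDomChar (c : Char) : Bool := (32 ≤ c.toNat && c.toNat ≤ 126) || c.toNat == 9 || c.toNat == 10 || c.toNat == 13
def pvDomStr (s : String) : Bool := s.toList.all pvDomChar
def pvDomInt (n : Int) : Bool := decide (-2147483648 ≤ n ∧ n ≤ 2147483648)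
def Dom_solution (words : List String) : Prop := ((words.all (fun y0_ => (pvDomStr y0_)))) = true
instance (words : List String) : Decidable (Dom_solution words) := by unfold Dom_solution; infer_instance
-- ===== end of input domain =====

-- B replaces A's mutable trie by a direct pairwise longest-common-prefix computation (simpler, though quadratic in the number of words).


-- ===== PORT A =====
-- A's trie node is identified by the path of characters from the root; the per-node counter
-- cur_node[0] lives in one dictionary keyed by that path (Python's nested list-and-dict node
-- [count, children] cannot be written as a Lean inductive with a List of children).  Each loop
-- performs exactly A's steps: create the child entry if absent, increment the current node,
-- descend one character.
def makeTrieLoop (d : PySem.Dict (List Char) Int) (cur : List Char) : List Char → PySem.Dict (List Char) Int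
  | [] => d.modify cur 0 (· + 1)                                -- trailing cur_node[0] += 1
  | c :: cs =>
      let d1 := if (d.get? (cur ++ [c])).isSome then d else d.insert (cur ++ [c]) 0
      let d2 := d1.modify cur 0 (· + 1)                         -- cur_node[0] += 1
      makeTrieLoop d2 (cur ++ [c]) cs                           -- cur_node = cur_node[1][c]

def searchLoop (d : PySem.Dict (List Char) Int) (ret : Int) (cur : List Char) : List Char → Int
  | [] => ret
  | c :: cs => if d.getD cur 0 = 1 then ret else searchLoop d (ret + 1) (cur ++ [c]) cs

def solution (words : List String) : Int :=
  let root := (PySem.Dict.empty.insert ([] : List Char) (0 : Int))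
  let d := words.foldl (fun d w => makeTrieLoop d [] w.toList) root
  words.foldl (fun acc w => acc + searchLoop d 0 [] w.toList) 0

-- ===== PORT B =====
-- lcp ports Source B's zip-with-break counting loop as structural recursion on the two lists.
def lcpB : List Char → List Char → Int
  | x :: xs, y :: ys => if x = y then 1 + lcpB xs ys else 0
  | _, _ => 0

def solution_alt (words : List String) : Int :=
  if words.length = 1 then 0 else
  (PySem.List.enumerate words).foldl (fun total iw =>
    let m := (PySem.List.slice words none (some iw.1) ++
              PySem.List.slice words (some (iw.1 + 1)) none).foldl
      (fun m u => max m (lcpB iw.2.toList u.toList)) 0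
    total + min (PySem.Str.len iw.2) (m + 1)) 0

-- ===== PRECONDITION & SPEC =====
def Spec_solution (words : List String) (out : Int) : Prop := out = solution_alt words
instance (words : List String) (out : Int) : Decidable (Spec_solution words out) := by unfold Spec_solution; infer_instance

-- ===== CLAIM (what is proved, stated in full; the proofs are below) =====
def Claim_equal_solution : Prop := ∀ (words : List String), Dom_solution words → Spec_solution words (solution words)

-- ===== LEMMAS AND PROOFS =====

-- number of words having p as a prefix, as an Int
def cntI (words : List String) (p : List Char) : Int :=
  (words.countP (fun w => decide (p <+: w.toList)) : Int)

-- Nat-valued common-prefix length, the proof-side mirror of lcpB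
def lcpN : List Char → List Char → Nat
  | x :: xs, y :: ys => if x = y then 1 + lcpN xs ys else 0
  | _, _ => 0

lemma lcpB_eq_lcpN (a b : List Char) : lcpB a b = (lcpN a b : Int) := by
  induction a generalizing b with
  | nil => cases b <;> simp [lcpB, lcpN]
  | cons x xs ih =>
    cases b with
    | nil => simp [lcpB, lcpN]
    | cons y ys =>
      by_cases h : x = y <;> simp [lcpB, lcpN, h, ih]

lemma take_prefix_iff (a b : List Char) (k : Nat) (hk : k ≤ a.length) :
    a.take k <+: b ↔ k ≤ lcpN a b := by
  induction a generalizing b k with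
  | nil =>
    have : k = 0 := by simpa using hk
    subst this; simp [lcpN]
  | cons x xs ih =>
    cases k with
    | zero => simp
    | succ j =>
      cases b with
      | nil =>
        simp only [List.take_succ_cons, lcpN]
        constructor
        · intro h; exact absurd (List.prefix_nil.mp h) (by simp)
        · intro h; exact absurd h (by omega)
      | cons y ys =>
        simp only [List.take_succ_cons, List.cons_prefix_cons, lcpN]
        by_cases h : x = y
        · simp only [h, true_and, if_true]
          rw [ih ys j (by simpa using hk)]
          omega
        · simp [h]

-- the prefixes of cur ++ c :: cs that extend cur are cur itself and those of cur ++ [c] ++ cs extending cur ++ [c]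
lemma ind_split (cur p : List Char) (c : Char) (cs : List Char) :
    ((if p = cur then (1 : Int) else 0)
      + (if cur ++ [c] <+: p ∧ p <+: (cur ++ [c]) ++ cs then 1 else 0))
      = (if cur <+: p ∧ p <+: cur ++ c :: cs then 1 else 0) := by
  by_cases h1 : p = cur
  · subst h1
    rw [if_pos rfl, if_neg, if_pos ⟨List.prefix_rfl, List.prefix_append _ _⟩, add_zero]
    rintro ⟨hpre, -⟩
    have := hpre.length_le
    simp at this
  · rw [if_neg h1]
    by_cases h2 : cur ++ [c] <+: p ∧ p <+: (cur ++ [c]) ++ cs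
    · rw [if_pos h2, if_pos, zero_add]
      refine ⟨(List.prefix_append cur [c]).trans h2.1, ?_⟩
      have := h2.2
      rwa [List.append_assoc, List.singleton_append] at this
    · rw [if_neg h2, if_neg, add_zero]
      rintro ⟨ha, hb⟩
      obtain ⟨q, rfl⟩ := ha
      have hq : q <+: c :: cs := (List.prefix_append_right_inj cur).mp hb
      cases q with
      | nil => exact h1 (by simp)
      | cons q0 q' =>
        obtain ⟨heq, hq'⟩ := List.cons_prefix_cons.mp hq
        subst heq
        refine h2 ⟨⟨q', by simp⟩, ?_⟩
        have := (List.prefix_append_right_inj (cur ++ [q0])).mpr hq'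
        simpa [List.append_assoc] using this

lemma makeTrieLoop_getD (cs : List Char) : ∀ (d : PySem.Dict (List Char) Int) (cur p : List Char),
    (makeTrieLoop d cur cs).getD p 0
      = d.getD p 0 + (if cur <+: p ∧ p <+: cur ++ cs then 1 else 0) := by
  induction cs with
  | nil =>
    intro d cur p
    simp only [makeTrieLoop, List.append_nil]
    by_cases h : p = cur
    · subst h
      rw [PySem.Dict.getD_modify_self, if_pos ⟨List.prefix_rfl, List.prefix_rfl⟩]
    · rw [PySem.Dict.getD_modify_of_ne _ _ _ h, if_neg, add_zero]
      rintro ⟨h1, h2⟩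
      exact h (h2.eq_of_length_le h1.length_le)
  | cons c cs ih =>
    intro d cur p
    simp only [makeTrieLoop]
    rw [ih]
    have hd1 : (if (d.get? (cur ++ [c])).isSome then d else d.insert (cur ++ [c]) 0).getD p 0
        = d.getD p 0 := by
      by_cases hs : (d.get? (cur ++ [c])).isSome
      · rw [if_pos hs]
      · rw [if_neg hs]
        by_cases hp : p = cur ++ [c]
        · subst hp
          rw [PySem.Dict.getD_insert_self]
          simp [PySem.Dict.getD, Option.not_isSome_iff_eq_none.mp hs]
        · rw [PySem.Dict.getD_insert_of_ne _ _ _ hp]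
    by_cases h : p = cur
    · subst h
      rw [PySem.Dict.getD_modify_self, hd1, ← ind_split p p c cs, if_pos rfl]
      ring
    · rw [PySem.Dict.getD_modify_of_ne _ _ _ h, hd1, ← ind_split cur p c cs, if_neg h]
      ring

lemma build_getD (words : List String) (d : PySem.Dict (List Char) Int) (p : List Char) :
    (words.foldl (fun d w => makeTrieLoop d [] w.toList) d).getD p 0
      = d.getD p 0 + cntI words p := by
  induction words generalizing d with
  | nil => simp [cntI]
  | cons w ws ih =>
    simp only [List.foldl_cons]
    rw [ih, makeTrieLoop_getD]
    have : cntI (w :: ws) p = (if p <+: w.toList then 1 else 0) + cntI ws p := by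
      simp only [cntI, List.countP_cons]
      by_cases h : p <+: w.toList <;> simp [h] <;> push_cast <;> ring
    rw [this]
    simp only [List.nil_append, List.nil_prefix, true_and]
    ring

lemma root_getD (p : List Char) :
    ((PySem.Dict.empty.insert ([] : List Char) (0 : Int))).getD p 0 = 0 := by
  by_cases h : p = []
  · subst h; simp [PySem.Dict.getD_insert_self]
  · rw [PySem.Dict.getD_insert_of_ne _ _ _ h]
    simp [PySem.Dict.getD, PySem.Dict.get?, PySem.Dict.empty]

lemma trie_getD (words : List String) (p : List Char) :
    ((words.foldl (fun d w => makeTrieLoop d [] w.toList)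
        (PySem.Dict.empty.insert ([] : List Char) (0 : Int)))).getD p 0 = cntI words p := by
  rw [build_getD, root_getD, zero_add]

lemma cntI_split (words : List String) (k : Nat) (hk : k < words.length) (p : List Char) :
    cntI words p
      = (if p <+: words[k].toList then 1 else 0) + cntI (words.eraseIdx k) p := by
  unfold cntI
  conv_lhs => rw [← List.take_append_drop k words, ← List.getElem_cons_drop hk]
  rw [List.eraseIdx_eq_take_drop_succ]
  rw [List.countP_append, List.countP_cons, List.countP_append]
  by_cases h : p <+: words[k].toList <;> simp [h] <;> push_cast <;> ring


def trieDict (words : List String) : PySem.Dict (List Char) Int :=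
  words.foldl (fun d w => makeTrieLoop d [] w.toList) (PySem.Dict.empty.insert ([] : List Char) (0 : Int))

lemma trieDict_getD (words : List String) (p : List Char) :
    (trieDict words).getD p 0 = cntI words p := trie_getD words p

-- B's inner running maximum over the other words
def maxLcp (w : String) (rest : List String) : Int :=
  rest.foldl (fun m u => max m (lcpB w.toList u.toList)) 0

lemma lcpB_nonneg (a b : List Char) : 0 ≤ lcpB a b := by
  rw [lcpB_eq_lcpN]; exact Int.natCast_nonneg _

-- the trie count of w's length-j prefix is 1 exactly when every other word's lcp with w is below j
lemma cnt_one_iff (words : List String) (k : Nat) (hk : k < words.length)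
    (hn : 2 ≤ words.length) (j : Nat) (hj : j ≤ words[k].toList.length) :
    (cntI words (words[k].toList.take j) = 1)
      ↔ maxLcp words[k] (words.eraseIdx k) < (j : Int) := by
  have hsplit := cntI_split words k hk (words[k].toList.take j)
  rw [if_pos (List.take_prefix j words[k].toList)] at hsplit
  have hrest0 : 0 ≤ cntI (words.eraseIdx k) (words[k].toList.take j) := Int.natCast_nonneg _
  have hMub : ∀ u ∈ words.eraseIdx k,
      lcpB words[k].toList u.toList ≤ maxLcp words[k] (words.eraseIdx k) :=
    (PySem.List.le_foldl_max_int (words.eraseIdx k)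
      (fun u => lcpB words[k].toList u.toList) 0).2
  have hne : words.eraseIdx k ≠ [] := by
    intro h
    have := List.length_eraseIdx (l := words) (i := k)
    rw [h, if_pos hk] at this
    simp at this
    omega
  constructor
  · intro h1
    have hz : cntI (words.eraseIdx k) (words[k].toList.take j) = 0 := by omega
    have hall : ∀ u ∈ words.eraseIdx k, lcpB words[k].toList u.toList < (j : Int) := by
      intro u hu
      have hcp : ¬ (words[k].toList.take j <+: u.toList) := by
        unfold cntI at hz
        have : (words.eraseIdx k).countP
            (fun w => decide (words[k].toList.take j <+: w.toList)) = 0 := by exact_mod_cast hz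
        have := List.countP_eq_zero.mp this u hu
        simpa using this
      rw [take_prefix_iff _ _ j hj] at hcp
      rw [lcpB_eq_lcpN]
      exact_mod_cast Nat.lt_of_not_le hcp
    have hM2 : maxLcp words[k] (words.eraseIdx k) = 0
        ∨ ∃ u ∈ words.eraseIdx k, maxLcp words[k] (words.eraseIdx k) = lcpB words[k].toList u.toList := by
      unfold maxLcp
      have hfm : List.foldl (fun m u => max m (lcpB words[k].toList u.toList)) 0 (words.eraseIdx k)
          = List.foldl max 0 ((words.eraseIdx k).map (fun u => lcpB words[k].toList u.toList)) :=
        List.foldl_map.symm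
      rw [hfm]
      rcases PySem.List.foldl_max_mem ((words.eraseIdx k).map (fun u => lcpB words[k].toList u.toList)) 0 with h | h
      · left; exact h
      · right
        obtain ⟨u, hu, he⟩ := List.mem_map.mp h
        exact ⟨u, hu, he.symm⟩
    rcases hM2 with h | ⟨u, hu, he⟩
    · rw [h]
      obtain ⟨u, hu⟩ := List.exists_mem_of_ne_nil _ hne
      have := hall u hu
      have := lcpB_nonneg words[k].toList u.toList
      omega
    · rw [he]; exact hall u hu
  · intro hMj
    have hz : cntI (words.eraseIdx k) (words[k].toList.take j) = 0 := by
      unfold cntI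
      have : (words.eraseIdx k).countP
          (fun w => decide (words[k].toList.take j <+: w.toList)) = 0 := by
        rw [List.countP_eq_zero]
        intro u hu hdec
        have hcp : words[k].toList.take j <+: u.toList := by simpa using hdec
        rw [take_prefix_iff _ _ j hj] at hcp
        have h1 : (j : Int) ≤ lcpB words[k].toList u.toList := by
          rw [lcpB_eq_lcpN]; exact_mod_cast hcp
        have h2 := hMub u hu
        omega
      exact_mod_cast this
    omega

-- the search loop, walked from position j, stops exactly at the threshold T
lemma searchLoop_walk (d : PySem.Dict (List Char) Int) (wl : List Char) (T : Int)
    (hT : T ≤ (wl.length : Int))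
    (hiff : ∀ j : Nat, j < wl.length → (d.getD (wl.take j) 0 = 1 ↔ T ≤ (j : Int))) :
    ∀ (jr j : Nat), j + jr = wl.length → (j : Int) ≤ T →
      searchLoop d (j : Int) (wl.take j) (wl.drop j) = T := by
  intro jr
  induction jr with
  | zero =>
    intro j hj hle
    have hjlen : j = wl.length := by omega
    subst hjlen
    rw [List.drop_length]
    simp only [searchLoop]
    omega
  | succ jr ih =>
    intro j hj hle
    have hjlt : j < wl.length := by omega
    rw [← List.getElem_cons_drop hjlt]
    simp only [searchLoop]
    by_cases hc : d.getD (wl.take j) 0 = 1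
    · rw [if_pos hc]
      have := (hiff j hjlt).mp hc
      omega
    · rw [if_neg hc]
      have hTj : ¬ T ≤ (j : Int) := fun h => hc ((hiff j hjlt).mpr h)
      have hcat : wl.take j ++ [wl[j]] = wl.take (j + 1) := by
        rw [← List.take_concat_get hjlt, List.concat_eq_append]
      have hcast : ((j : Int) + 1) = ((j + 1 : Nat) : Int) := by push_cast; ring
      rw [hcat, hcast]
      exact ih (j + 1) (by omega) (by omega)

-- per word: A's trie walk returns min(len(w), maxLcp+1)
lemma perIndex (words : List String) (hn : 2 ≤ words.length) (k : Nat) (hk : k < words.length) :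
    searchLoop (trieDict words) 0 [] words[k].toList
      = min ((words[k].toList.length : Int)) (maxLcp words[k] (words.eraseIdx k) + 1) := by
  have hM0 : (0 : Int) ≤ maxLcp words[k] (words.eraseIdx k) :=
    (PySem.List.le_foldl_max_int (words.eraseIdx k)
      (fun u => lcpB words[k].toList u.toList) 0).1
  have hT : min ((words[k].toList.length : Int)) (maxLcp words[k] (words.eraseIdx k) + 1)
      ≤ (words[k].toList.length : Int) := min_le_left _ _
  have hiff : ∀ j : Nat, j < words[k].toList.length →
      ((trieDict words).getD (words[k].toList.take j) 0 = 1
        ↔ min ((words[k].toList.length : Int)) (maxLcp words[k] (words.eraseIdx k) + 1) ≤ (j : Int)) := by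
    intro j hj
    rw [trieDict_getD, cnt_one_iff words k hk hn j (le_of_lt hj), min_le_iff]
    have : (j : Int) < (words[k].toList.length : Int) := by exact_mod_cast hj
    omega
  have h0 : ((0 : Nat) : Int) ≤ min ((words[k].toList.length : Int)) (maxLcp words[k] (words.eraseIdx k) + 1) := by
    have : (0 : Int) ≤ (words[k].toList.length : Int) := Int.natCast_nonneg _
    simp only [Nat.cast_zero, le_min_iff]
    constructor <;> [exact this; omega]
  have := searchLoop_walk (trieDict words) words[k].toList _ hT hiff words[k].toList.length 0
    (by omega) h0
  simpa using this

-- ===== VERDICT (by name: the statement is the Claim_ definition above) =====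
theorem solution_spec : Claim_equal_solution := by
  intro words _
  unfold Spec_solution
  by_cases h1 : words.length = 1
  · obtain ⟨w, rfl⟩ := List.length_eq_one_iff.mp h1
    have hroot : (trieDict [w]).getD [] 0 = 1 := by
      rw [trieDict_getD]
      simp [cntI]
    show (List.foldl (fun acc w' => acc + searchLoop (trieDict [w]) 0 [] w'.toList) 0 [w])
        = solution_alt [w]
    rw [solution_alt]
    simp only [List.length_cons, List.length_nil, if_true, List.foldl_cons, List.foldl_nil, zero_add]
    cases hw : w.toList with
    | nil => simp [searchLoop]
    | cons c cs => simp [searchLoop, hroot]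
  · show (List.foldl (fun acc w' => acc + searchLoop (trieDict words) 0 [] w'.toList) 0 words)
        = solution_alt words
    rw [solution_alt, if_neg h1]
    rw [PySem.List.foldl_add words (fun w' => searchLoop (trieDict words) 0 [] w'.toList) 0]
    rw [PySem.List.foldl_add (PySem.List.enumerate words) _ 0]
    simp only [zero_add]
    congr 1
    conv_lhs => rw [← PySem.List.map_snd_enumerate words 0, List.map_map]
    apply List.map_congr_left
    intro p hp
    obtain ⟨k, hk, rfl⟩ := (PySem.List.mem_enumerate_iff words 0 p).mp hp
    have hn2 : 2 ≤ words.length := by omega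
    simp only [zero_add, Function.comp_apply]
    rw [PySem.List.map_snd_enumerate]
    have hcast : ((k : Int) + 1) = ((k + 1 : Nat) : Int) := by push_cast; ring
    rw [PySem.List.slice_to_natCast, hcast, PySem.List.slice_from_natCast,
        ← List.eraseIdx_eq_take_drop_succ, PySem.Str.len_eq]
    exact perIndex words hn2 k hk
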